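-- pv_equiv track=rewrite | github.com/jerrygergov/axxon-telegram-vms | axxon_telegram_vms/ui/telegram_face_search.py | format_face_search_wizard_period_label
-- ===== SOURCE A (Python) =====
-- FACE_SEARCH_WIZARD_PERIOD_PRESETS: tuple[tuple[int, str], ...] = (
--     (15 * 60, "15m"),
--     (60 * 60, "1h"),
--     (6 * 60 * 60, "6h"),
--     (24 * 60 * 60, "24h"),
-- )
--
-- def format_face_search_wizard_period_label(seconds: int) -> str:
--     for preset_seconds, label in FACE_SEARCH_WIZARD_PERIOD_PRESETS:
--         if seconds == preset_seconds:
--             return label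
--     if seconds % 3600 == 0:
--         return f"{seconds // 3600}h"
--     if seconds % 60 == 0:
--         return f"{seconds // 60}m"
--     return f"{seconds}s"
-- ===== SOURCE B (Python) =====
-- def format_face_search_wizard_period_label(seconds: int) -> str:
--     if seconds % 3600 == 0:
--         return f"{seconds // 3600}h"
--     if seconds % 60 == 0:
--         return f"{seconds // 60}m"
--     return f"{seconds}s"
-- ===== Notes on version B (the rewrite author's own statement) =====
-- stated objective: simpler
-- what changed: Dropped the FACE_SEARCH_WIZARD_PERIOD_PRESETS table and its scan loop entirely; each preset value already maps to exactly the string the divisibility formula produces, so B is just the three divisibility branches.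
import Mathlib
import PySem

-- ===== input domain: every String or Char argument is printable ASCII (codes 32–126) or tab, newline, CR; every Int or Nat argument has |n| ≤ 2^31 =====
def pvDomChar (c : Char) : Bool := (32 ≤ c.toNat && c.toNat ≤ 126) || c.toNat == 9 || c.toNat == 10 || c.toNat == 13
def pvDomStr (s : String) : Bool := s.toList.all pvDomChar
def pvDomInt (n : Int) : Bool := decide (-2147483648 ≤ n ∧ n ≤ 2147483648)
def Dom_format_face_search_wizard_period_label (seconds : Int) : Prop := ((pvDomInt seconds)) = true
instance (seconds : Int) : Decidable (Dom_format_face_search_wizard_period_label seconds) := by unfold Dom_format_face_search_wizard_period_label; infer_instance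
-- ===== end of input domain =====

-- B drops A's preset table and scan loop: each preset value maps to exactly the string
-- the divisibility formula produces, so B is just the three divisibility branches (simpler).

-- ===== PORT A =====
def FACE_SEARCH_WIZARD_PERIOD_PRESETS : List (Int × String) :=
  [(15 * 60, "15m"), (60 * 60, "1h"), (6 * 60 * 60, "6h"), (24 * 60 * 60, "24h")]

-- the for-loop with early return over the preset table
def pvPresetScan (seconds : Int) : List (Int × String) → Option String
  | [] => none
  | (presetSeconds, label) :: rest =>
      if seconds = presetSeconds then some label else pvPresetScan seconds rest

def format_face_search_wizard_period_label (seconds : Int) : String :=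
  match pvPresetScan seconds FACE_SEARCH_WIZARD_PERIOD_PRESETS with
  | some label => label
  | none =>
      if PySem.Int.mod seconds 3600 = 0 then
        PySem.Int.toStr (PySem.Int.floordiv seconds 3600) ++ "h"
      else if PySem.Int.mod seconds 60 = 0 then
        PySem.Int.toStr (PySem.Int.floordiv seconds 60) ++ "m"
      else
        PySem.Int.toStr seconds ++ "s"

-- ===== PORT B =====
def format_face_search_wizard_period_label_alt (seconds : Int) : String :=
  if PySem.Int.mod seconds 3600 = 0 then
    PySem.Int.toStr (PySem.Int.floordiv seconds 3600) ++ "h"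
  else if PySem.Int.mod seconds 60 = 0 then
    PySem.Int.toStr (PySem.Int.floordiv seconds 60) ++ "m"
  else
    PySem.Int.toStr seconds ++ "s"

-- ===== PRECONDITION & SPEC =====
def Spec_format_face_search_wizard_period_label (seconds : Int) (out : String) : Prop := out = format_face_search_wizard_period_label_alt seconds
instance (seconds : Int) (out : String) : Decidable (Spec_format_face_search_wizard_period_label seconds out) := by unfold Spec_format_face_search_wizard_period_label; infer_instance

-- ===== CLAIM (what is proved, stated in full; the proofs are below) =====
def Claim_equal_format_face_search_wizard_period_label : Prop := ∀ (seconds : Int), Dom_format_face_search_wizard_period_label seconds → Spec_format_face_search_wizard_period_label seconds (format_face_search_wizard_period_label seconds)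

-- ===== LEMMAS AND PROOFS =====

-- ===== VERDICT (by name: the statement is the Claim_ definition above) =====
theorem format_face_search_wizard_period_label_spec : Claim_equal_format_face_search_wizard_period_label := by
  intro s _
  unfold Spec_format_face_search_wizard_period_label format_face_search_wizard_period_label
  by_cases h1 : s = 900
  · subst h1; decide
  by_cases h2 : s = 3600
  · subst h2; decide
  by_cases h3 : s = 21600
  · subst h3; decide
  by_cases h4 : s = 86400
  · subst h4; decide
  simp [FACE_SEARCH_WIZARD_PERIOD_PRESETS, pvPresetScan, h1, h2, h3, h4,
    format_face_search_wizard_period_label_alt]
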